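-- pv_equiv track=rewrite | github.com/kashyapa/coding-problems | educative.io/medium-dp/fibonacci/3_number_factors.py | count_ways2
-- ===== SOURCE A (Python) =====
-- def count_ways2(n):
--     if n <= 2:
--         return 1
--     if n == 3:
--         return 2
--
--     dp = [0 for x in range(n + 1)]
--     dp[0] = 1
--     dp[1] = 1
--     dp[2] = 1
--     dp[3] = 2
--
--     for i in range(4, n + 1):
--         dp[i] = dp[i - 1] + dp[i - 3] + dp[i - 4]
--
--     return dp[n]
-- ===== SOURCE B (Python) =====
-- def count_ways2(n):
--     if n <= 2:
--         return 1
--     if n == 3: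
--         return 2
--
--     def mul(A, B):
--         return tuple(tuple(sum(A[i][k] * B[k][j] for k in range(4)) for j in range(4)) for i in range(4))
--
--     M = ((1, 0, 1, 1), (1, 0, 0, 0), (0, 1, 0, 0), (0, 0, 1, 0))
--     R = ((1, 0, 0, 0), (0, 1, 0, 0), (0, 0, 1, 0), (0, 0, 0, 1))
--     e = n - 3
--     while e:
--         if e & 1:
--             R = mul(R, M)
--         M = mul(M, M)
--         e >>= 1
--     v = (2, 1, 1, 1)
--     return sum(R[0][k] * v[k] for k in range(4))
-- ===== Notes on version B (the rewrite author's own statement) =====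
-- stated objective: faster
-- what changed: Replaced the linear dp-array scan of the recurrence by binary exponentiation of its companion matrix; intended as faster (logarithmically many arithmetic operations), measured several-fold faster at the largest sizes where both finish.
import Mathlib
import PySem

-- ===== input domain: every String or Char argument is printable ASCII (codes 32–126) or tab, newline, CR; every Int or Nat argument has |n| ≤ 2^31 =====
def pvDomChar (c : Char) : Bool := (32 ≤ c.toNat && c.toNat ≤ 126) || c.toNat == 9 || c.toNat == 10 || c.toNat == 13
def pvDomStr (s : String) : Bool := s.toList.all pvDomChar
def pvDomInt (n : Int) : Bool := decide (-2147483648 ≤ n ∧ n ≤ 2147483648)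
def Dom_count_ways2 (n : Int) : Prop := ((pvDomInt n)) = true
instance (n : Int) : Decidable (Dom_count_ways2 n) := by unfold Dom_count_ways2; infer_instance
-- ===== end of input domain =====

-- B replaces A's linear dp-array scan by binary exponentiation of the recurrence's companion
-- matrix (logarithmically many arithmetic operations); intended as faster, measured
-- several-fold faster at the largest sizes where both finish.

-- ===== PORT A =====
-- literal transliteration of A: build dp[0..n], fill by the recurrence, return dp[n]
def count_ways2 (n : Int) : Int :=
  if n ≤ 2 then 1
  else if n = 3 then 2
  else
    let dp : List Int := List.replicate ((n + 1).toNat) 0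
    let dp := ((dp.set 0 1).set 1 1 |>.set 2 1).set 3 2
    let dp := (PySem.List.pyRange 4 (n + 1) 1).foldl
      (fun dp i => dp.set i.toNat ((dp.getD (i - 1).toNat 0) + (dp.getD (i - 3).toNat 0) + (dp.getD (i - 4).toNat 0))) dp
    dp.getD n.toNat 0

-- ===== PORT B =====
-- B-side helpers: 4x4 integer matrix, its product, and Source B's squaring loop
structure Mat where
  a11 : Int
  a12 : Int
  a13 : Int
  a14 : Int
  a21 : Int
  a22 : Int
  a23 : Int
  a24 : Int
  a31 : Int
  a32 : Int
  a33 : Int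
  a34 : Int
  a41 : Int
  a42 : Int
  a43 : Int
  a44 : Int
deriving DecidableEq, Repr

def Mat.mul (A B : Mat) : Mat :=
  ⟨A.a11*B.a11 + A.a12*B.a21 + A.a13*B.a31 + A.a14*B.a41,
   A.a11*B.a12 + A.a12*B.a22 + A.a13*B.a32 + A.a14*B.a42,
   A.a11*B.a13 + A.a12*B.a23 + A.a13*B.a33 + A.a14*B.a43,
   A.a11*B.a14 + A.a12*B.a24 + A.a13*B.a34 + A.a14*B.a44,
   A.a21*B.a11 + A.a22*B.a21 + A.a23*B.a31 + A.a24*B.a41,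
   A.a21*B.a12 + A.a22*B.a22 + A.a23*B.a32 + A.a24*B.a42,
   A.a21*B.a13 + A.a22*B.a23 + A.a23*B.a33 + A.a24*B.a43,
   A.a21*B.a14 + A.a22*B.a24 + A.a23*B.a34 + A.a24*B.a44,
   A.a31*B.a11 + A.a32*B.a21 + A.a33*B.a31 + A.a34*B.a41,
   A.a31*B.a12 + A.a32*B.a22 + A.a33*B.a32 + A.a34*B.a42,
   A.a31*B.a13 + A.a32*B.a23 + A.a33*B.a33 + A.a34*B.a43,
   A.a31*B.a14 + A.a32*B.a24 + A.a33*B.a34 + A.a34*B.a44,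
   A.a41*B.a11 + A.a42*B.a21 + A.a43*B.a31 + A.a44*B.a41,
   A.a41*B.a12 + A.a42*B.a22 + A.a43*B.a32 + A.a44*B.a42,
   A.a41*B.a13 + A.a42*B.a23 + A.a43*B.a33 + A.a44*B.a43,
   A.a41*B.a14 + A.a42*B.a24 + A.a43*B.a34 + A.a44*B.a44⟩

-- companion matrix of f(k+4) = f(k+3) + f(k+1) + f(k)
def Mcomp : Mat := ⟨1,0,1,1, 1,0,0,0, 0,1,0,0, 0,0,1,0⟩

def idMat : Mat := ⟨1,0,0,0, 0,1,0,0, 0,0,1,0, 0,0,0,1⟩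

-- Source B's `while e:` squaring loop (e ≥ 1 there, ported over Nat)
def binPowLoop (r m : Mat) (e : Nat) : Mat :=
  if e = 0 then r
  else binPowLoop (if e % 2 = 1 then r.mul m else r) (m.mul m) (e / 2)
termination_by e
decreasing_by exact Nat.div_lt_self (by omega) (by omega)

def count_ways2_alt (n : Int) : Int :=
  if n ≤ 2 then 1
  else if n = 3 then 2
  else
    let r := binPowLoop idMat Mcomp (n - 3).toNat
    r.a11 * 2 + r.a12 * 1 + r.a13 * 1 + r.a14 * 1

-- ===== PRECONDITION & SPEC =====
def Spec_count_ways2 (n : Int) (out : Int) : Prop := out = count_ways2_alt n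
instance (n : Int) (out : Int) : Decidable (Spec_count_ways2 n out) := by unfold Spec_count_ways2; infer_instance

-- ===== CLAIM (what is proved, stated in full; the proofs are below) =====
def Claim_equal_count_ways2 : Prop := ∀ (n : Int), Dom_count_ways2 n → Spec_count_ways2 n (count_ways2 n)

-- ===== LEMMAS AND PROOFS =====

-- the mathematical sequence both programs compute
def f : Nat → Int
  | 0 => 1
  | 1 => 1
  | 2 => 1
  | 3 => 2
  | (k+4) => f (k+3) + f (k+1) + f k

theorem Mat.mul_assoc' (A B C : Mat) : (A.mul B).mul C = A.mul (B.mul C) := by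
  cases A; cases B; cases C
  simp only [Mat.mul, Mat.mk.injEq]
  and_intros <;> ring

theorem Mat.one_mul' (A : Mat) : idMat.mul A = A := by
  cases A; simp only [Mat.mul, idMat, Mat.mk.injEq]; and_intros <;> ring

theorem Mat.mul_one' (A : Mat) : A.mul idMat = A := by
  cases A; simp only [Mat.mul, idMat, Mat.mk.injEq]; and_intros <;> ring

-- naive power, the specification of the squaring loop
def npw (m : Mat) : Nat → Mat
  | 0 => idMat
  | k+1 => (npw m k).mul m

theorem npw_comm (m : Mat) (k : Nat) : m.mul (npw m k) = (npw m k).mul m := by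
  induction k with
  | zero => simp [npw, Mat.one_mul', Mat.mul_one']
  | succ k ih => simp only [npw]; rw [← Mat.mul_assoc', ih]

theorem npw_sq (m : Mat) (k : Nat) : npw (m.mul m) k = npw m (2 * k) := by
  induction k with
  | zero => rfl
  | succ k ih =>
      have : 2 * (k + 1) = (2 * k + 1) + 1 := by ring
      rw [this]
      simp only [npw, ih, Mat.mul_assoc']

theorem binPowLoop_eq (e : Nat) : ∀ r m : Mat, binPowLoop r m e = r.mul (npw m e) := by
  induction e using Nat.strong_induction_on with
  | _ e ih =>
    intro r m
    rw [binPowLoop]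
    by_cases h0 : e = 0
    · simp [h0, npw, Mat.mul_one']
    · have hlt : e / 2 < e := Nat.div_lt_self (by omega) (by omega)
      rw [if_neg h0, ih _ hlt, npw_sq]
      by_cases hp : e % 2 = 1
      · have he : 2 * (e / 2) + 1 = e := by omega
        have hstep : (npw m (2 * (e / 2))).mul m = npw m (2 * (e / 2) + 1) := rfl
        rw [if_pos hp, Mat.mul_assoc', npw_comm, hstep, he]
      · have he : 2 * (e / 2) = e := by omega
        rw [if_neg hp, he]

-- applying a matrix to the state vector (f(k+3), f(k+2), f(k+1), f(k))
def app (m : Mat) (v : Int × Int × Int × Int) : Int × Int × Int × Int :=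
  (m.a11*v.1 + m.a12*v.2.1 + m.a13*v.2.2.1 + m.a14*v.2.2.2,
   m.a21*v.1 + m.a22*v.2.1 + m.a23*v.2.2.1 + m.a24*v.2.2.2,
   m.a31*v.1 + m.a32*v.2.1 + m.a33*v.2.2.1 + m.a34*v.2.2.2,
   m.a41*v.1 + m.a42*v.2.1 + m.a43*v.2.2.1 + m.a44*v.2.2.2)

theorem app_mul (A B : Mat) (v : Int × Int × Int × Int) : app (A.mul B) v = app A (app B v) := by
  cases A; cases B
  simp only [app, Mat.mul, Prod.mk.injEq]
  and_intros <;> ring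

theorem app_npw (k : Nat) : app (npw Mcomp k) (2, 1, 1, 1) = (f (k+3), f (k+2), f (k+1), f k) := by
  induction k with
  | zero => simp [npw, app, idMat, f]
  | succ k ih =>
      have : npw Mcomp (k+1) = Mcomp.mul (npw Mcomp k) := by
        simp only [npw]; rw [npw_comm]
      rw [this, app_mul, ih]
      simp only [app, Mcomp, f]
      refine Prod.ext ?_ (Prod.ext ?_ (Prod.ext ?_ ?_)) <;> simp

theorem alt_eq_f (n : Int) (h : 4 ≤ n) : count_ways2_alt n = f n.toNat := by
  have h2 : ¬ n ≤ 2 := by omega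
  have h3 : ¬ n = 3 := by omega
  simp only [count_ways2_alt, if_neg h2, if_neg h3]
  rw [binPowLoop_eq, Mat.one_mul']
  have hk : n.toNat = (n - 3).toNat + 3 := by omega
  have := app_npw (n - 3).toNat
  have h1 : (app (npw Mcomp (n - 3).toNat) (2, 1, 1, 1)).1 = f ((n - 3).toNat + 3) := by
    rw [this]
  simp only [app] at h1
  rw [hk]
  linarith [h1]

-- ---------- A side ----------

-- the loop step of A
def stepA (dp : List Int) (i : Int) : List Int :=
  dp.set i.toNat ((dp.getD (i - 1).toNat 0) + (dp.getD (i - 3).toNat 0) + (dp.getD (i - 4).toNat 0))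

theorem getD_set_ne (dp : List Int) (k j : Nat) (v : Int) (h : j ≠ k) :
    (dp.set k v).getD j 0 = dp.getD j 0 := by
  simp [List.getD, h.symm]

theorem getD_set_eq (dp : List Int) (k : Nat) (v : Int) (h : k < dp.length) :
    (dp.set k v).getD k 0 = v := by
  simp [List.getD, h]

theorem loopA_inv (c : Nat) : ∀ (a : Nat) (dp : List Int), 4 ≤ a →
    a + c ≤ dp.length →
    (∀ j, j < a → dp.getD j 0 = f j) →
    ∀ j, j < a + c →
      ((PySem.List.pyRange (a : Int) ((a : Int) + c) 1).foldl stepA dp).getD j 0 = f j := by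
  induction c with
  | zero =>
      intro a dp _ _ hinv j hj
      have hnil : PySem.List.pyRange (a : Int) ((a : Int) + ((0:Nat) : Int)) 1 = [] := by
        rw [PySem.List.pyRange_one]; norm_num
      rw [hnil, List.foldl_nil]
      exact hinv j (by omega)
  | succ c ih =>
      intro a dp ha hlen hinv j hj
      have hcons : PySem.List.pyRange (a : Int) ((a : Int) + (c+1 : Nat)) 1
          = (a : Int) :: PySem.List.pyRange ((a : Int) + 1) ((a : Int) + (c+1 : Nat)) 1 := by
        apply PySem.List.pyRange_one_cons
        push_cast; omega
      have hrest : ((a : Int) + (c + 1 : Nat)) = ((a : Int) + 1) + (c : Nat) := by push_cast; ring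
      -- after one step, the invariant holds up to a+1
      have halen : a < dp.length := by omega
      have hset : ∀ j, j < a + 1 → (stepA dp (a : Int)).getD j 0 = f j := by
        intro j hja
        by_cases hj' : j = a
        · subst hj'
          have e1 : ((j : Int) - 1).toNat = j - 1 := by omega
          have e3 : ((j : Int) - 3).toNat = j - 3 := by omega
          have e4 : ((j : Int) - 4).toNat = j - 4 := by omega
          have et : ((j : Int)).toNat = j := by omega
          simp only [stepA, e1, e3, e4, et]
          rw [getD_set_eq _ _ _ halen]
          rw [hinv (j-1) (by omega), hinv (j-3) (by omega), hinv (j-4) (by omega)]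
          obtain ⟨k, hk⟩ : ∃ k, j = k + 4 := ⟨j - 4, by omega⟩
          subst hk
          have e1' : k + 4 - 1 = k + 3 := by omega
          have e3' : k + 4 - 3 = k + 1 := by omega
          have e4' : k + 4 - 4 = k := by omega
          rw [e1', e3', e4']
          simp [f]
        · have et : ((a : Int)).toNat = a := by omega
          simp only [stepA, et]
          rw [getD_set_ne _ _ _ _ hj']
          exact hinv j (by omega)
      have hlen' : (stepA dp (a : Int)).length = dp.length := by
        simp [stepA]
      rw [hcons]
      simp only [List.foldl_cons]
      rw [hrest]
      have hcast : ((a : Int) + 1) = ((a + 1 : Nat) : Int) := by push_cast; ring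
      rw [hcast]
      exact ih (a + 1) (stepA dp (a : Int)) (by omega) (by omega) hset j (by omega)

theorem a_eq_f (n : Int) (h : 4 ≤ n) : count_ways2 n = f n.toNat := by
  have h2 : ¬ n ≤ 2 := by omega
  have h3 : ¬ n = 3 := by omega
  simp only [count_ways2, if_neg h2, if_neg h3]
  set dp0 : List Int := (((List.replicate ((n + 1).toNat) (0:Int)).set 0 1).set 1 1 |>.set 2 1).set 3 2 with hdp0
  have hlen0 : dp0.length = (n + 1).toNat := by simp [hdp0]
  have hbig : 5 ≤ (n + 1).toNat := by omega
  have hinit : ∀ j, j < 4 → dp0.getD j 0 = f j := by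
    intro j hj
    interval_cases j
    · rw [hdp0, getD_set_ne _ _ _ _ (by omega), getD_set_ne _ _ _ _ (by omega),
        getD_set_ne _ _ _ _ (by omega), getD_set_eq _ _ _ (by simp; omega)]
      rfl
    · rw [hdp0, getD_set_ne _ _ _ _ (by omega), getD_set_ne _ _ _ _ (by omega),
        getD_set_eq _ _ _ (by simp; omega)]
      rfl
    · rw [hdp0, getD_set_ne _ _ _ _ (by omega), getD_set_eq _ _ _ (by simp; omega)]
      rfl
    · rw [hdp0, getD_set_eq _ _ _ (by simp; omega)]
      rfl
  obtain ⟨c, hc⟩ : ∃ c : Nat, n + 1 = ((4:Nat) : Int) + c := ⟨(n - 3).toNat, by push_cast; omega⟩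
  show (List.foldl stepA dp0 (PySem.List.pyRange 4 (n + 1) 1)).getD n.toNat 0 = f n.toNat
  rw [hc]
  exact loopA_inv c 4 dp0 (by omega) (by omega) hinit n.toNat (by omega)
-- ===== VERDICT (by name: the statement is the Claim_ definition above) =====
theorem count_ways2_spec : Claim_equal_count_ways2 := by
  intro n _
  unfold Spec_count_ways2
  by_cases h2 : n ≤ 2
  · simp [count_ways2, count_ways2_alt, h2]
  · by_cases h3 : n = 3
    · simp [count_ways2, count_ways2_alt, h3]
    · have h4 : 4 ≤ n := by omega
      rw [a_eq_f n h4, alt_eq_f n h4]
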